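-- pv_equiv track=rewrite | github.com/jakej985-rgb/Subaru.specs.n.parts | legacy/lumen_wide.py | determine_body
-- ===== SOURCE A (Python) =====
-- from typing import List, Dict, Any, Tuple, Optional
--
-- def determine_body(vehicle: Dict[str, Any]) -> str:
--     """Determines the body type from vehicle data."""
--     body = vehicle.get("body", "")
--     if body:
--         return body
--
--     trim = vehicle.get("trim", "").lower()
--     model = vehicle.get("model", "").lower()
--
--     if any(x in trim for x in ["wagon", "touring wagon"]):
--         return "Wagon"
--     elif any(x in trim for x in ["sedan", "touring sedan"]):
--         return "Sedan"
--     elif any(x in model for x in ["outback", "forester", "ascent", "crosstrek", "xv"]):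
--         return "Crossover"
--     elif "brz" in model or "svx" in model or "alcyone" in model or "xt" in model:
--         return "Coupe"
--     elif "brat" in model:
--         return "Pickup"
--     elif "impreza" in model or "wrx" in model or "legacy" in model:
--         return "Sedan"
--     else:
--         return "Hatchback"
-- ===== SOURCE B (Python) =====
-- _KEYWORDS = [
--     ("wagon", "trim", 0), ("touring wagon", "trim", 0),
--     ("sedan", "trim", 1), ("touring sedan", "trim", 1),
--     ("outback", "model", 2), ("forester", "model", 2), ("ascent", "model", 2),
--     ("crosstrek", "model", 2), ("xv", "model", 2),
--     ("brz", "model", 3), ("svx", "model", 3), ("alcyone", "model", 3), ("xt", "model", 3),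
--     ("brat", "model", 4),
--     ("impreza", "model", 5), ("wrx", "model", 5), ("legacy", "model", 5),
-- ]
-- _LABELS = ["Wagon", "Sedan", "Crossover", "Coupe", "Pickup", "Sedan", "Hatchback"]
--
--
-- def determine_body(vehicle):
--     """Determines the body type from vehicle data."""
--     body = vehicle.get("body", "")
--     if body:
--         return body
--     texts = {"trim": vehicle.get("trim", "").lower(),
--              "model": vehicle.get("model", "").lower()}
--     hits = [prio for kw, field, prio in _KEYWORDS if kw in texts[field]]
--     return _LABELS[min(hits, default=6)]
-- ===== Notes on version B (the rewrite author's own statement) =====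
-- stated objective: alternative
-- what changed: Instead of a short-circuiting if/elif chain, B flattens all keywords into one (keyword, field, priority) table, collects the priorities of every matching keyword in a single exhaustive pass, and indexes a label array by the minimum priority (default 6 = Hatchback).
import Mathlib
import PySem

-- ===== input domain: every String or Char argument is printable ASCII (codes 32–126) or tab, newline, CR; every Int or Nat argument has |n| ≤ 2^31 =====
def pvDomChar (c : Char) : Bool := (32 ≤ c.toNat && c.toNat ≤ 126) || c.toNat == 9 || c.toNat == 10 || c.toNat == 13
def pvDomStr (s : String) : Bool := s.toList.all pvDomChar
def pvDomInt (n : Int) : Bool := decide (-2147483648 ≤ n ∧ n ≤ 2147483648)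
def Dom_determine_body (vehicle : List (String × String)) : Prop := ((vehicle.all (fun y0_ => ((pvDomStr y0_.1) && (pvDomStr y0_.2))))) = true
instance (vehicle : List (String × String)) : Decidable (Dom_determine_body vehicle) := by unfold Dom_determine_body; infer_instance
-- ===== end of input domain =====

-- B replaces the short-circuiting if/elif chain by an exhaustive pass over one flat (keyword, field, priority) table, indexing a label array by the minimum matched priority (alternative decomposition, same cost).

-- ===== PORT A =====
def determine_body (vehicle : List (String × String)) : String :=
  let body := PySem.Dict.getD (PySem.Dict.mk vehicle) "body" ""
  if body ≠ "" then body
  else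
    let trim := PySem.Str.lower (PySem.Dict.getD (PySem.Dict.mk vehicle) "trim" "")
    let model := PySem.Str.lower (PySem.Dict.getD (PySem.Dict.mk vehicle) "model" "")
    if (["wagon", "touring wagon"].any fun x => PySem.Str.isIn x trim) then "Wagon"
    else if (["sedan", "touring sedan"].any fun x => PySem.Str.isIn x trim) then "Sedan"
    else if (["outback", "forester", "ascent", "crosstrek", "xv"].any fun x => PySem.Str.isIn x model) then "Crossover"
    else if PySem.Str.isIn "brz" model || PySem.Str.isIn "svx" model || PySem.Str.isIn "alcyone" model || PySem.Str.isIn "xt" model then "Coupe"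
    else if PySem.Str.isIn "brat" model then "Pickup"
    else if PySem.Str.isIn "impreza" model || PySem.Str.isIn "wrx" model || PySem.Str.isIn "legacy" model then "Sedan"
    else "Hatchback"

-- ===== PORT B =====
def pvKeywords : List (String × String × Int) :=
  [ ("wagon", "trim", 0), ("touring wagon", "trim", 0),
    ("sedan", "trim", 1), ("touring sedan", "trim", 1),
    ("outback", "model", 2), ("forester", "model", 2), ("ascent", "model", 2),
    ("crosstrek", "model", 2), ("xv", "model", 2),
    ("brz", "model", 3), ("svx", "model", 3), ("alcyone", "model", 3), ("xt", "model", 3),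
    ("brat", "model", 4),
    ("impreza", "model", 5), ("wrx", "model", 5), ("legacy", "model", 5) ]

def pvLabels : List String :=
  ["Wagon", "Sedan", "Crossover", "Coupe", "Pickup", "Sedan", "Hatchback"]

def determine_body_alt (vehicle : List (String × String)) : String :=
  let body := PySem.Dict.getD (PySem.Dict.mk vehicle) "body" ""
  if body ≠ "" then body
  else
    let texts : PySem.Dict String String :=
      PySem.Dict.mk [("trim", PySem.Str.lower (PySem.Dict.getD (PySem.Dict.mk vehicle) "trim" "")),
                     ("model", PySem.Str.lower (PySem.Dict.getD (PySem.Dict.mk vehicle) "model" ""))]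
    let hits := pvKeywords.filterMap (fun kfp =>
      if PySem.Str.isIn kfp.1 (PySem.Dict.getD texts kfp.2.1 "") then some kfp.2.2 else none)
    ((PySem.List.pyGet? pvLabels ((PySem.List.min? hits (fun x => x)).getD 6)).getD "")

-- ===== PRECONDITION & SPEC =====
def Spec_determine_body (vehicle : List (String × String)) (out : String) : Prop := out = determine_body_alt vehicle
instance (vehicle : List (String × String)) (out : String) : Decidable (Spec_determine_body vehicle out) := by unfold Spec_determine_body; infer_instance

-- ===== CLAIM =====
def Claim_equal_determine_body : Prop := ∀ (vehicle : List (String × String)), Dom_determine_body vehicle → Spec_determine_body vehicle (determine_body vehicle)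

-- ===== LEMMAS AND PROOFS =====
theorem pv_foldl_min_eq (t : List Int) (x : Int) (h : ∀ y ∈ t, x ≤ y) :
    t.foldl min x = x := by
  induction t generalizing x with
  | nil => rfl
  | cons a r ih =>
      simp only [List.foldl_cons]
      rw [min_eq_left (h a (by simp))]
      exact ih x (fun y hy => h y (by simp [hy]))

-- min of the collected priorities of a priority-sorted rule list = priority of the first hit
theorem pv_min_first (l : List (Bool × Int)) (d : Int)
    (hs : l.Pairwise (fun a b => a.2 ≤ b.2)) (hd : ∀ p ∈ l, p.2 ≤ d) :
    ((PySem.List.min? (l.filterMap (fun p => if p.1 then some p.2 else none)) (fun x => x)).getD d)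
      = (((l.find? (fun p => p.1)).map (fun p => p.2)).getD d) := by
  induction l with
  | nil => rfl
  | cons p t ih =>
      rcases hs with _ | ⟨hp, ht⟩
      by_cases hc : p.1
      · simp only [List.filterMap_cons, List.find?_cons, hc, if_pos, Option.map_some]
        rw [PySem.List.min?_id_cons]
        simp only [Option.getD_some]
        apply pv_foldl_min_eq
        intro y hy
        rcases List.mem_filterMap.mp hy with ⟨q, hq, hfq⟩
        have : y = q.2 := by by_cases h2 : q.1 <;> simp [h2] at hfq <;> omega
        subst this
        exact hp q hq
      · simp only [List.filterMap_cons, List.find?_cons, hc]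
        simp only [Bool.false_eq_true, if_false, reduceIte]
        exact ih ht (fun q hq => hd q (by simp [hq]))

theorem pv_tex_trim (t m : String) :
    PySem.Dict.getD (PySem.Dict.mk [("trim", t), ("model", m)]) "trim" "" = t := rfl

theorem pv_tex_model (t m : String) :
    PySem.Dict.getD (PySem.Dict.mk [("trim", t), ("model", m)]) "model" "" = m := rfl

-- ===== VERDICT =====
set_option maxHeartbeats 1000000 in
theorem determine_body_spec : Claim_equal_determine_body := by
  intro vehicle _
  unfold Spec_determine_body determine_body determine_body_alt
  set t := PySem.Str.lower (PySem.Dict.getD (PySem.Dict.mk vehicle) "trim" "") with ht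
  set m := PySem.Str.lower (PySem.Dict.getD (PySem.Dict.mk vehicle) "model" "") with hm
  by_cases hb : PySem.Dict.getD (PySem.Dict.mk vehicle) "body" "" = ""
  · simp only [hb, ne_eq, not_true_eq_false, if_false, ite_false]
    have hfm :
        (pvKeywords.filterMap (fun kfp =>
          if PySem.Str.isIn kfp.1 (PySem.Dict.getD (PySem.Dict.mk [("trim", t), ("model", m)]) kfp.2.1 "") then some kfp.2.2 else none))
        = ((pvKeywords.map (fun kfp =>
            (PySem.Str.isIn kfp.1 (PySem.Dict.getD (PySem.Dict.mk [("trim", t), ("model", m)]) kfp.2.1 ""), kfp.2.2))).filterMap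
            (fun p => if p.1 then some p.2 else none)) := by
      rw [List.filterMap_map]; rfl
    rw [hfm, pv_min_first]
    · simp only [pvKeywords, List.map_cons, List.map_nil, pv_tex_trim, pv_tex_model]
      by_cases h0 : PySem.Str.isIn "wagon" t
      · simp only [h0, List.find?_cons, List.find?_nil, List.any_cons, List.any_nil, Bool.true_or, Bool.false_or, Bool.or_false, Bool.or_true, Bool.or_self, if_true, if_false, Option.map_some, Option.map_none, Option.getD_some, Option.getD_none, Bool.false_eq_true, ite_true, ite_false]
        rfl
      by_cases h1 : PySem.Str.isIn "touring wagon" t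
      · simp only [h0, h1, List.find?_cons, List.find?_nil, List.any_cons, List.any_nil, Bool.true_or, Bool.false_or, Bool.or_false, Bool.or_true, Bool.or_self, if_true, if_false, Option.map_some, Option.map_none, Option.getD_some, Option.getD_none, Bool.false_eq_true, ite_true, ite_false]
        rfl
      by_cases h2 : PySem.Str.isIn "sedan" t
      · simp only [h0, h1, h2, List.find?_cons, List.find?_nil, List.any_cons, List.any_nil, Bool.true_or, Bool.false_or, Bool.or_false, Bool.or_true, Bool.or_self, if_true, if_false, Option.map_some, Option.map_none, Option.getD_some, Option.getD_none, Bool.false_eq_true, ite_true, ite_false]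
        rfl
      by_cases h3 : PySem.Str.isIn "touring sedan" t
      · simp only [h0, h1, h2, h3, List.find?_cons, List.find?_nil, List.any_cons, List.any_nil, Bool.true_or, Bool.false_or, Bool.or_false, Bool.or_true, Bool.or_self, if_true, if_false, Option.map_some, Option.map_none, Option.getD_some, Option.getD_none, Bool.false_eq_true, ite_true, ite_false]
        rfl
      by_cases h4 : PySem.Str.isIn "outback" m
      · simp only [h0, h1, h2, h3, h4, List.find?_cons, List.find?_nil, List.any_cons, List.any_nil, Bool.true_or, Bool.false_or, Bool.or_false, Bool.or_true, Bool.or_self, if_true, if_false, Option.map_some, Option.map_none, Option.getD_some, Option.getD_none, Bool.false_eq_true, ite_true, ite_false]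
        rfl
      by_cases h5 : PySem.Str.isIn "forester" m
      · simp only [h0, h1, h2, h3, h4, h5, List.find?_cons, List.find?_nil, List.any_cons, List.any_nil, Bool.true_or, Bool.false_or, Bool.or_false, Bool.or_true, Bool.or_self, if_true, if_false, Option.map_some, Option.map_none, Option.getD_some, Option.getD_none, Bool.false_eq_true, ite_true, ite_false]
        rfl
      by_cases h6 : PySem.Str.isIn "ascent" m
      · simp only [h0, h1, h2, h3, h4, h5, h6, List.find?_cons, List.find?_nil, List.any_cons, List.any_nil, Bool.true_or, Bool.false_or, Bool.or_false, Bool.or_true, Bool.or_self, if_true, if_false, Option.map_some, Option.map_none, Option.getD_some, Option.getD_none, Bool.false_eq_true, ite_true, ite_false]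
        rfl
      by_cases h7 : PySem.Str.isIn "crosstrek" m
      · simp only [h0, h1, h2, h3, h4, h5, h6, h7, List.find?_cons, List.find?_nil, List.any_cons, List.any_nil, Bool.true_or, Bool.false_or, Bool.or_false, Bool.or_true, Bool.or_self, if_true, if_false, Option.map_some, Option.map_none, Option.getD_some, Option.getD_none, Bool.false_eq_true, ite_true, ite_false]
        rfl
      by_cases h8 : PySem.Str.isIn "xv" m
      · simp only [h0, h1, h2, h3, h4, h5, h6, h7, h8, List.find?_cons, List.find?_nil, List.any_cons, List.any_nil, Bool.true_or, Bool.false_or, Bool.or_false, Bool.or_true, Bool.or_self, if_true, if_false, Option.map_some, Option.map_none, Option.getD_some, Option.getD_none, Bool.false_eq_true, ite_true, ite_false]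
        rfl
      by_cases h9 : PySem.Str.isIn "brz" m
      · simp only [h0, h1, h2, h3, h4, h5, h6, h7, h8, h9, List.find?_cons, List.find?_nil, List.any_cons, List.any_nil, Bool.true_or, Bool.false_or, Bool.or_false, Bool.or_true, Bool.or_self, if_true, if_false, Option.map_some, Option.map_none, Option.getD_some, Option.getD_none, Bool.false_eq_true, ite_true, ite_false]
        rfl
      by_cases h10 : PySem.Str.isIn "svx" m
      · simp only [h0, h1, h2, h3, h4, h5, h6, h7, h8, h9, h10, List.find?_cons, List.find?_nil, List.any_cons, List.any_nil, Bool.true_or, Bool.false_or, Bool.or_false, Bool.or_true, Bool.or_self, if_true, if_false, Option.map_some, Option.map_none, Option.getD_some, Option.getD_none, Bool.false_eq_true, ite_true, ite_false]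
        rfl
      by_cases h11 : PySem.Str.isIn "alcyone" m
      · simp only [h0, h1, h2, h3, h4, h5, h6, h7, h8, h9, h10, h11, List.find?_cons, List.find?_nil, List.any_cons, List.any_nil, Bool.true_or, Bool.false_or, Bool.or_false, Bool.or_true, Bool.or_self, if_true, if_false, Option.map_some, Option.map_none, Option.getD_some, Option.getD_none, Bool.false_eq_true, ite_true, ite_false]
        rfl
      by_cases h12 : PySem.Str.isIn "xt" m
      · simp only [h0, h1, h2, h3, h4, h5, h6, h7, h8, h9, h10, h11, h12, List.find?_cons, List.find?_nil, List.any_cons, List.any_nil, Bool.true_or, Bool.false_or, Bool.or_false, Bool.or_true, Bool.or_self, if_true, if_false, Option.map_some, Option.map_none, Option.getD_some, Option.getD_none, Bool.false_eq_true, ite_true, ite_false]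
        rfl
      by_cases h13 : PySem.Str.isIn "brat" m
      · simp only [h0, h1, h2, h3, h4, h5, h6, h7, h8, h9, h10, h11, h12, h13, List.find?_cons, List.find?_nil, List.any_cons, List.any_nil, Bool.true_or, Bool.false_or, Bool.or_false, Bool.or_true, Bool.or_self, if_true, if_false, Option.map_some, Option.map_none, Option.getD_some, Option.getD_none, Bool.false_eq_true, ite_true, ite_false]
        rfl
      by_cases h14 : PySem.Str.isIn "impreza" m
      · simp only [h0, h1, h2, h3, h4, h5, h6, h7, h8, h9, h10, h11, h12, h13, h14, List.find?_cons, List.find?_nil, List.any_cons, List.any_nil, Bool.true_or, Bool.false_or, Bool.or_false, Bool.or_true, Bool.or_self, if_true, if_false, Option.map_some, Option.map_none, Option.getD_some, Option.getD_none, Bool.false_eq_true, ite_true, ite_false]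
        rfl
      by_cases h15 : PySem.Str.isIn "wrx" m
      · simp only [h0, h1, h2, h3, h4, h5, h6, h7, h8, h9, h10, h11, h12, h13, h14, h15, List.find?_cons, List.find?_nil, List.any_cons, List.any_nil, Bool.true_or, Bool.false_or, Bool.or_false, Bool.or_true, Bool.or_self, if_true, if_false, Option.map_some, Option.map_none, Option.getD_some, Option.getD_none, Bool.false_eq_true, ite_true, ite_false]
        rfl
      by_cases h16 : PySem.Str.isIn "legacy" m
      · simp only [h0, h1, h2, h3, h4, h5, h6, h7, h8, h9, h10, h11, h12, h13, h14, h15, h16, List.find?_cons, List.find?_nil, List.any_cons, List.any_nil, Bool.true_or, Bool.false_or, Bool.or_false, Bool.or_true, Bool.or_self, if_true, if_false, Option.map_some, Option.map_none, Option.getD_some, Option.getD_none, Bool.false_eq_true, ite_true, ite_false]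
        rfl
      simp only [h0, h1, h2, h3, h4, h5, h6, h7, h8, h9, h10, h11, h12, h13, h14, h15, h16, List.find?_cons, List.find?_nil, List.any_cons, List.any_nil, Bool.true_or, Bool.false_or, Bool.or_false, Bool.or_true, Bool.or_self, if_true, if_false, Option.map_some, Option.map_none, Option.getD_some, Option.getD_none, Bool.false_eq_true, ite_true, ite_false]
      rfl
    · simp [pvKeywords, List.pairwise_cons]
    · simp [pvKeywords]
  · simp only [ne_eq, hb, not_false_eq_true, if_true, ite_true]
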